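-- pv_equiv track=rewrite | github.com/ASSERT-KTH/Mokav | experiments/pynguin/c4b/single-return/generated_tests/src_2269/2/src_2269.py | func
-- ===== SOURCE A (Python) =====
-- def func(*args):
--
-- 	a = args[0]
-- 	arr = []
-- 	s = a.lower()
-- 	s1 = s.replace('a', '')
-- 	s2 = s1.replace('e', '')
-- 	s3 = s2.replace('i', '')
-- 	s4 = s3.replace('o', '')
-- 	s5 = s4.replace('y', '')
-- 	s6 = s5.replace('u', '')
-- 	for i in range(len(s6)):
-- 	    arr.append('.')
-- 	    arr.append(str(s6[i]))
-- 	return(''.join((str(x) for x in arr)))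
-- ===== SOURCE B (Python) =====
-- def func(*args):
--     a = args[0]
--     return ''.join('.' + c for c in a.lower() if c not in 'aeiouy')
-- ===== Notes on version B (the rewrite author's own statement) =====
-- stated objective: simpler
-- what changed: Replaces A's six sequential .replace passes plus a separate index-loop building a list of one-character strings with a single filter-and-format pass over a.lower() in one join'ed generator expression (fewer passes and intermediate strings).
import Mathlib
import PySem

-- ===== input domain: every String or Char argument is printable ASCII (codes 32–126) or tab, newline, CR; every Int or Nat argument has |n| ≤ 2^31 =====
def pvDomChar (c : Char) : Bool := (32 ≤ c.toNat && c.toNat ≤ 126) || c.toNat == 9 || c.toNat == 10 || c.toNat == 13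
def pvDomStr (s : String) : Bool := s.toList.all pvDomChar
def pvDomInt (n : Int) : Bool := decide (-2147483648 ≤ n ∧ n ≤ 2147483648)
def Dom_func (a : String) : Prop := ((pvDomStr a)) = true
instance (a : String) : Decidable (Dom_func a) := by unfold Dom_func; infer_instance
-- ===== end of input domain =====

-- B replaces A's six sequential .replace passes and separate index loop with one
-- filter-and-format pass over a.lower() (objective: simpler).

-- ===== PORT A =====
def func (a : String) : String :=
  let arr : List String := []
  let s := PySem.Str.lower a
  let s1 := PySem.Str.replace s "a" ""
  let s2 := PySem.Str.replace s1 "e" ""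
  let s3 := PySem.Str.replace s2 "i" ""
  let s4 := PySem.Str.replace s3 "o" ""
  let s5 := PySem.Str.replace s4 "y" ""
  let s6 := PySem.Str.replace s5 "u" ""
  let arr := (PySem.List.pyRange 0 (PySem.Str.len s6) 1).foldl
      (fun arr i => (arr ++ ["."]) ++ [String.ofList [PySem.List.pyGetD s6.toList i ' ']]) arr
  PySem.Str.join "" arr

-- ===== PORT B =====
def func_alt (a : String) : String :=
  PySem.Str.join "" ((PySem.Str.lower a).toList.filterMap
    (fun c => if PySem.Str.isIn (String.ofList [c]) "aeiouy" then none
              else some (String.ofList ['.', c])))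

-- ===== PRECONDITION & SPEC =====
def Spec_func (a : String) (out : String) : Prop := out = func_alt a
instance (a : String) (out : String) : Decidable (Spec_func a out) := by unfold Spec_func; infer_instance

-- ===== CLAIM (what is proved, stated in full; the proofs are below) =====
def Claim_equal_func : Prop := ∀ (a : String), Dom_func a → Spec_func a (func a)

-- ===== LEMMAS AND PROOFS =====

-- replace by a single character with "" is a filter
theorem replace_go_single (v : Char) : ∀ (l : List Char) (fuel : Nat) (acc : List Char),
    l.length ≤ fuel →
    PySem.Chars.replace.go [v] [] fuel l acc = acc.reverse ++ l.filter (· != v) := by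
  intro l
  induction l with
  | nil => intro fuel acc _; cases fuel <;> simp [PySem.Chars.replace.go]
  | cons c t ih =>
    intro fuel acc h
    cases fuel with
    | zero => simp at h
    | succ n =>
      simp only [List.length_cons, Nat.succ_le_succ_iff] at h
      by_cases hv : v = c
      · subst hv
        simp [PySem.Chars.replace.go, List.isPrefixOf, ih _ _ h]
      · have : [v].isPrefixOf (c :: t) = false := by
          simp [List.isPrefixOf]; exact fun hc => (hv hc).elim
        simp [PySem.Chars.replace.go, this, ih _ _ h, Ne.symm hv]

theorem replace_single (v : Char) (l : List Char) :
    PySem.Chars.replace l [v] [] = l.filter (· != v) := by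
  simpa using replace_go_single v l l.length [] le_rfl

theorem flatten_intersperse_nil (l : List (List Char)) :
    (List.intersperse ([] : List Char) l).flatten = l.flatten := by
  induction l with
  | nil => rfl
  | cons x t ih => cases t <;> simp_all [List.intersperse]

-- A's loop result, flattened on the char side
theorem joinA (L : List Char) :
    PySem.Chars.join [] ((L.flatMap (fun c => [".", String.ofList [c]])).map String.toList)
      = L.flatMap (fun c => ['.', c]) := by
  simp only [PySem.Chars.join, List.intercalate, flatten_intersperse_nil]
  induction L with
  | nil => rfl
  | cons c t ih => simp_all

-- B's comprehension result, flattened on the char side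
theorem joinB (p : Char → Bool) (L : List Char) :
    PySem.Chars.join [] ((L.filterMap
        (fun c => if p c then none else some (String.ofList ['.', c]))).map String.toList)
      = (L.filter (fun c => !p c)).flatMap (fun c => ['.', c]) := by
  simp only [PySem.Chars.join, List.intercalate, flatten_intersperse_nil]
  induction L with
  | nil => rfl
  | cons c t ih => by_cases h : p c <;> simp_all

theorem vowel_test (c : Char) :
    PySem.Chars.isIn [c] ['a', 'e', 'i', 'o', 'u', 'y']
      = (c == 'a' || c == 'e' || c == 'i' || c == 'o' || c == 'u' || c == 'y') := by
  rw [Bool.eq_iff_iff, PySem.Chars.isIn_iff_infix, List.singleton_infix_iff]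
  simp
  tauto


-- ===== VERDICT (by name: the statement is the Claim_ definition above) =====
theorem func_spec : Claim_equal_func := by
  intro a _
  unfold Spec_func func func_alt
  apply String.toList_injective
  simp only [PySem.Str.toList_join, PySem.Str.len]
  simp only [PySem.Str.toList_replace]
  rw [show ("a" : String).toList = ['a'] from rfl, show ("e" : String).toList = ['e'] from rfl,
      show ("i" : String).toList = ['i'] from rfl, show ("o" : String).toList = ['o'] from rfl,
      show ("y" : String).toList = ['y'] from rfl, show ("u" : String).toList = ['u'] from rfl,
      show ("" : String).toList = [] from rfl]
  simp only [replace_single, List.filter_filter]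
  rw [PySem.List.foldl_pyRange_zero_pyGetD'
        _ ' ' (fun arr c => (arr ++ ["."]) ++ [String.ofList [c]]) []]
  simp only [List.append_assoc, List.singleton_append]
  rw [show (fun (arr : List String) (c : Char) => arr ++ ["." , String.ofList [c]])
        = fun arr c => arr ++ (fun c => [".", String.ofList [c]]) c from rfl,
      PySem.List.foldl_append_eq_flatMap, List.nil_append, joinA]
  have hb : ∀ (M : List Char),
      (List.map String.toList (M.filterMap
          (fun c => if PySem.Str.isIn (String.ofList [c]) "aeiouy" = true then none
                    else some (String.ofList ['.', c])))) =
      (List.map String.toList (M.filterMap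
          (fun c => if (c == 'a' || c == 'e' || c == 'i' || c == 'o' || c == 'u' || c == 'y') then none
                    else some (String.ofList ['.', c])))) := by
    intro M
    congr 1
    apply List.filterMap_congr
    intro c _
    rw [show PySem.Str.isIn (String.ofList [c]) "aeiouy"
          = PySem.Chars.isIn [c] ['a','e','i','o','u','y'] by simp [PySem.Str.isIn_eq], vowel_test]
  rw [hb, joinB]
  congr 1
  apply List.filter_congr
  intro c _
  cases hc : (c == 'a' || c == 'e' || c == 'i' || c == 'o' || c == 'u' || c == 'y') <;>
    simp_all <;> tauto
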